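-- pv_equiv track=rewrite | github.com/wangruopeng1131/Interpreter | grammar_generator.py | isLL1
-- ===== SOURCE A (Python) =====
-- def isLL1(select: dict) -> bool:
--     for l1, r1 in select.items():
--         x = l1.split('->')[0]
--         for l2, r2 in select.items():
--             y = l2.split('->')[0]
--             if l1 != l2 and x == y and len(r1 & r2) != 0:
--                 return False
--     return True
-- ===== SOURCE B (Python) =====
-- def isLL1(select: dict) -> bool:
--     merged = {}
--     for prod, sel in select.items():
--         lhs = prod.split('->')[0]
--         acc = merged.get(lhs)
--         if acc is None:
--             merged[lhs] = set(sel)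
--         elif acc & sel:
--             return False
--         else:
--             acc |= sel
--     return True
-- ===== Notes on version B (the rewrite author's own statement) =====
-- stated objective: faster
-- what changed: Instead of comparing every pair of productions (quadratic double scan over select.items()), B makes one pass, grouping by left-hand side in a dict that accumulates the union of the select sets seen so far and reporting a conflict as soon as a new production's select set intersects the accumulated union for its LHS.
import Mathlib
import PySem

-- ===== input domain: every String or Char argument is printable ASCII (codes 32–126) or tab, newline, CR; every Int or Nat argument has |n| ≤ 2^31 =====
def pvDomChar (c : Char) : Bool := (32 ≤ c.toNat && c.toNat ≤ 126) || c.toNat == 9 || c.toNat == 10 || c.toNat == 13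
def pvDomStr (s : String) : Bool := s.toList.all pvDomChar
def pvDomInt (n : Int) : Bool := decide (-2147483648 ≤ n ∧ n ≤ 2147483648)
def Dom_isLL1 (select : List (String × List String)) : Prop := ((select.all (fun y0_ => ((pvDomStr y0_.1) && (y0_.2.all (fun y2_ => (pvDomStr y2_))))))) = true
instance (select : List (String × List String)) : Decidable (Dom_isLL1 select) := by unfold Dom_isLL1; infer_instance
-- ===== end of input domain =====

-- B replaces A's quadratic all-pairs scan of select.items() by one pass that groups
-- productions by LHS and incrementally unions their select sets, detecting overlap (objective: faster).


-- shared helper: `s.split('->')[0]` — exact: the separator "->" is nonempty so split? = some,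
-- and str.split with a nonempty separator never returns an empty list, so index 0 never raises
def lhsOf (s : String) : String := ((PySem.Str.split? s "->").getD []).headD ""

-- ===== PORT A =====
-- the input is dict[str, set[str]]: the association list is decoded through Dict.ofList
-- (duplicate keys collapse, last value wins) and each value list through Set.ofList
def isLL1 (select : List (String × List String)) : Bool :=
  let items := (PySem.Dict.ofList select).items
  items.all (fun p =>
    let x := lhsOf p.1
    items.all (fun q =>
      let y := lhsOf q.1
      !(p.1 != q.1 && x == y &&
        PySem.Set.len (PySem.Set.inter (PySem.Set.ofList p.2) (PySem.Set.ofList q.2)) != 0)))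

-- ===== PORT B =====
-- one pass over items; `merged` maps an LHS to the union of the select sets already seen for it
def isLL1AltGo (merged : PySem.Dict String (PySem.Set String)) :
    List (String × List String) → Bool
  | [] => true
  | (prod, sel) :: rest =>
    let lhs := lhsOf prod
    let s := PySem.Set.ofList sel
    match merged.get? lhs with
    | none => isLL1AltGo (merged.insert lhs s) rest
    | some acc =>
      if PySem.Set.isdisjoint acc s then
        isLL1AltGo (merged.insert lhs (PySem.Set.union acc s)) rest
      else false

def isLL1_alt (select : List (String × List String)) : Bool :=
  isLL1AltGo PySem.Dict.empty (PySem.Dict.ofList select).items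

-- ===== PRECONDITION & SPEC =====
def Spec_isLL1 (select : List (String × List String)) (out : Bool) : Prop := out = isLL1_alt select
instance (select : List (String × List String)) (out : Bool) : Decidable (Spec_isLL1 select out) := by unfold Spec_isLL1; infer_instance

-- ===== CLAIM (what is proved, stated in full; the proofs are below) =====
def Claim_equal_isLL1 : Prop := ∀ (select : List (String × List String)), Dom_isLL1 select → Spec_isLL1 select (isLL1 select)

-- ===== LEMMAS AND PROOFS =====

-- two distinct productions with the same LHS whose select sets intersect
def Bad (p q : String × List String) : Prop :=
  lhsOf p.1 = lhsOf q.1 ∧ ∃ x ∈ p.2, x ∈ q.2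

theorem Bad_symm {p q : String × List String} (h : Bad p q) : Bad q p := by
  obtain ⟨h1, x, hx1, hx2⟩ := h
  exact ⟨h1.symm, x, hx2, hx1⟩

-- A's inner test, as a proposition
theorem inner_iff (p q : String × List String) :
    (!(p.1 != q.1 && lhsOf p.1 == lhsOf q.1 &&
        PySem.Set.len (PySem.Set.inter (PySem.Set.ofList p.2) (PySem.Set.ofList q.2)) != 0)) = true
      ↔ ¬ (p.1 ≠ q.1 ∧ Bad p q) := by
  have hnil : PySem.Set.inter (PySem.Set.ofList p.2) (PySem.Set.ofList q.2) = []
      ↔ ¬ ∃ x ∈ p.2, x ∈ q.2 := by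
    rw [List.eq_nil_iff_forall_not_mem]
    constructor
    · rintro h ⟨x, hx1, hx2⟩
      exact h x ((PySem.Set.mem_inter _ _ x).mpr
        ⟨(PySem.Set.mem_ofList _ x).mpr hx1, (PySem.Set.mem_ofList _ x).mpr hx2⟩)
    · intro h x hx
      have := (PySem.Set.mem_inter _ _ x).mp hx
      exact h ⟨x, (PySem.Set.mem_ofList _ x).mp this.1, (PySem.Set.mem_ofList _ x).mp this.2⟩
  simp only [Bad, PySem.Set.len, ne_eq, Int.natCast_eq_zero,
    List.length_eq_zero_iff, hnil, Bool.not_eq_eq_eq_not, Bool.not_true, Bool.and_eq_false_iff,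
    bne_eq_false_iff_eq, beq_eq_false_iff_ne]
  constructor
  · rintro ((h | h) | h) ⟨h1, h2, h3⟩
    · exact h1 h
    · exact h h2
    · exact h h3
  · intro h
    by_cases h1 : p.1 = q.1
    · exact Or.inl (Or.inl h1)
    · by_cases h2 : lhsOf p.1 = lhsOf q.1
      · exact Or.inr (fun h3 => h ⟨h1, h2, h3⟩)
      · exact Or.inl (Or.inr h2)

-- A = the all-pairs condition
theorem isLL1_eq_forall (select : List (String × List String)) :
    isLL1 select = true ↔
      ∀ p ∈ (PySem.Dict.ofList select).items, ∀ q ∈ (PySem.Dict.ofList select).items,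
        ¬ (p.1 ≠ q.1 ∧ Bad p q) := by
  unfold isLL1
  simp only [List.all_eq_true]
  constructor
  · intro h p hp q hq; exact (inner_iff p q).mp (h p hp q hq)
  · intro h p hp q hq; exact (inner_iff p q).mpr (h p hp q hq)

-- on a list with pairwise-distinct keys the all-pairs condition is exactly Pairwise (¬ Bad)
theorem forall_iff_pairwise :
    ∀ (L : List (String × List String)), (L.map Prod.fst).Nodup →
      ((∀ p ∈ L, ∀ q ∈ L, ¬ (p.1 ≠ q.1 ∧ Bad p q)) ↔ L.Pairwise (fun p q => ¬ Bad p q)) := by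
  intro L
  induction L with
  | nil => simp
  | cons a t ih =>
    intro hnd
    rw [List.map_cons, List.nodup_cons] at hnd
    constructor
    · intro h
      refine List.Pairwise.cons ?_ ((ih hnd.2).mp ?_)
      · intro q hq hb
        have hne : a.1 ≠ q.1 := by
          intro e
          exact hnd.1 (e ▸ List.mem_map_of_mem hq)
        exact h a (List.mem_cons_self) q (List.mem_cons_of_mem _ hq) ⟨hne, hb⟩
      · intro p hp q hq
        exact h p (List.mem_cons_of_mem _ hp) q (List.mem_cons_of_mem _ hq)
    · intro h p hp q hq hc
      obtain ⟨hne, hb⟩ := hc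
      obtain ⟨hhead, htail⟩ := List.pairwise_cons.mp h
      rcases List.mem_cons.mp hp with rfl | hp' <;> rcases List.mem_cons.mp hq with rfl | hq'
      · exact hne rfl
      · exact hhead q hq' hb
      · exact hhead p hp' (Bad_symm hb)
      · exact ((ih hnd.2).mpr htail) p hp' q hq' ⟨hne, hb⟩

-- B's loop invariant: the result is true iff the remaining items are pairwise conflict-free
-- and no remaining item conflicts with what `merged` has already accumulated for its LHS
theorem go_iff :
    ∀ (L : List (String × List String)) (merged : PySem.Dict String (PySem.Set String)),
      isLL1AltGo merged L = true ↔
        (L.Pairwise (fun p q => ¬ Bad p q) ∧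
         ∀ p ∈ L, ∀ acc, merged.get? (lhsOf p.1) = some acc → ∀ x ∈ p.2, x ∉ acc) := by
  intro L
  induction L with
  | nil => intro merged; simp [isLL1AltGo]
  | cons a t ih =>
    intro merged
    obtain ⟨prod, sel⟩ := a
    simp only [isLL1AltGo]
    cases hget : merged.get? (lhsOf prod) with
    | none =>
      rw [ih]
      constructor
      · rintro ⟨hpw, hC⟩
        refine ⟨List.Pairwise.cons ?_ hpw, ?_⟩
        · intro q hq hb
          obtain ⟨hl, x, hx1, hx2⟩ := hb
          have := hC q hq (PySem.Set.ofList sel)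
            (by rw [PySem.Dict.get?_insert, if_pos hl.symm])
          exact this x hx2 ((PySem.Set.mem_ofList _ x).mpr hx1)
        · intro p hp acc hacc x hx
          rcases List.mem_cons.mp hp with rfl | hp'
          · rw [hget] at hacc; cases hacc
          · by_cases he : lhsOf p.1 = lhsOf prod
            · exfalso; rw [he, hget] at hacc; cases hacc
            · have := hC p hp' acc (by rw [PySem.Dict.get?_insert, if_neg he]; exact hacc)
              exact this x hx
      · rintro ⟨hpw, hC⟩
        obtain ⟨hhead, htail⟩ := List.pairwise_cons.mp hpw
        refine ⟨htail, ?_⟩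
        intro p hp acc hacc x hx
        rw [PySem.Dict.get?_insert] at hacc
        by_cases he : lhsOf p.1 = lhsOf prod
        · rw [if_pos he] at hacc
          cases hacc
          intro hxs
          exact hhead p hp ⟨he.symm, x, (PySem.Set.mem_ofList _ x).mp hxs, hx⟩
        · rw [if_neg he] at hacc
          exact hC p (List.mem_cons_of_mem _ hp) acc hacc x hx
    | some acc =>
      change (if PySem.Set.isdisjoint acc (PySem.Set.ofList sel) = true then
          isLL1AltGo (merged.insert (lhsOf prod) (PySem.Set.union acc (PySem.Set.ofList sel))) t
        else false) = true ↔ _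
      by_cases hdis : PySem.Set.isdisjoint acc (PySem.Set.ofList sel) = true
      · rw [if_pos hdis, ih]
        have hdis' := (PySem.Set.isdisjoint_iff _ _).mp hdis
        constructor
        · rintro ⟨hpw, hC⟩
          refine ⟨List.Pairwise.cons ?_ hpw, ?_⟩
          · intro q hq hb
            obtain ⟨hl, x, hx1, hx2⟩ := hb
            have := hC q hq (PySem.Set.union acc (PySem.Set.ofList sel))
              (by rw [PySem.Dict.get?_insert, if_pos hl.symm])
            exact this x hx2 ((PySem.Set.mem_union _ _ x).mpr
              (Or.inr ((PySem.Set.mem_ofList _ x).mpr hx1)))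
          · intro p hp acc' hacc' x hx
            rcases List.mem_cons.mp hp with rfl | hp'
            · rw [hget] at hacc'
              cases hacc'
              intro hxa
              exact hdis' x hxa ((PySem.Set.mem_ofList _ x).mpr hx)
            · by_cases he : lhsOf p.1 = lhsOf prod
              · have := hC p hp' (PySem.Set.union acc (PySem.Set.ofList sel))
                  (by rw [PySem.Dict.get?_insert, if_pos he])
                rw [he, hget] at hacc'
                cases hacc'
                intro hxa
                exact this x hx ((PySem.Set.mem_union _ _ x).mpr (Or.inl hxa))
              · have := hC p hp' acc' (by rw [PySem.Dict.get?_insert, if_neg he]; exact hacc')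
                exact this x hx
        · rintro ⟨hpw, hC⟩
          obtain ⟨hhead, htail⟩ := List.pairwise_cons.mp hpw
          refine ⟨htail, ?_⟩
          intro p hp acc' hacc' x hx
          rw [PySem.Dict.get?_insert] at hacc'
          by_cases he : lhsOf p.1 = lhsOf prod
          · rw [if_pos he] at hacc'
            cases hacc'
            intro hxu
            rcases (PySem.Set.mem_union _ _ x).mp hxu with hxa | hxs
            · exact hC p (List.mem_cons_of_mem _ hp) acc (he ▸ hget) x hx hxa
            · exact hhead p hp ⟨he.symm, x, (PySem.Set.mem_ofList _ x).mp hxs, hx⟩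
          · rw [if_neg he] at hacc'
            exact hC p (List.mem_cons_of_mem _ hp) acc' hacc' x hx
      · rw [if_neg hdis]
        simp only [Bool.false_eq_true, false_iff, not_and]
        intro _ hC
        apply hdis
        rw [PySem.Set.isdisjoint_iff]
        intro x hxa hxs
        exact hC (prod, sel) (List.mem_cons_self) acc hget x
          ((PySem.Set.mem_ofList _ x).mp hxs) hxa

theorem isLL1_alt_eq_pairwise (select : List (String × List String)) :
    isLL1_alt select = true ↔
      ((PySem.Dict.ofList select).items).Pairwise (fun p q => ¬ Bad p q) := by
  unfold isLL1_alt
  rw [go_iff]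
  simp [PySem.Dict.get?_empty]

-- ===== VERDICT (by name: the statement is the Claim_ definition above) =====
theorem isLL1_spec : Claim_equal_isLL1 := by
  intro select _
  unfold Spec_isLL1
  have hnd : (((PySem.Dict.ofList select).items).map Prod.fst).Nodup :=
    PySem.Dict.nodup_keys_ofList select
  have hA := (isLL1_eq_forall select).trans
    (forall_iff_pairwise ((PySem.Dict.ofList select).items) hnd)
  have hB := isLL1_alt_eq_pairwise select
  cases ha : isLL1 select <;> cases hb : isLL1_alt select
  · rfl
  · exact absurd (hA.mpr (hB.mp hb)) (by simp [ha])
  · exact absurd (hB.mpr (hA.mp ha)) (by simp [hb])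
  · rfl
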